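-- pv_equiv track=rewrite | github.com/cptntrps/contract-v2 | scripts/consolidate_phase1.py | categorize_test_file
-- ===== SOURCE A (Python) =====
-- def categorize_test_file(filename):
--     """Determine which subdirectory a test file should go to."""
--     name_lower = filename.lower()
--
--     # Integration tests
--     if any(x in name_lower for x in ['integration', 'api', 'workflow', 'full', 'complete']):
--         if 'analysis' in name_lower:
--             return 'tests/integration/analysis'
--         elif 'report' in name_lower:
--             return 'tests/integration/reports'
--         else:
--             return 'tests/integration/workflows'
--
--     # Unit tests by component
--     if any(x in name_lower for x in ['model', 'contract', 'template']):
--         return 'tests/unit/models'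
--     elif any(x in name_lower for x in ['service', 'analyzer', 'processor']):
--         return 'tests/unit/services'
--     elif any(x in name_lower for x in ['util', 'helper', 'validator']):
--         return 'tests/unit/utils'
--     elif any(x in name_lower for x in ['route', 'endpoint', 'api']):
--         return 'tests/unit/api'
--
--     # Default to integration
--     return 'tests/integration/workflows'
-- ===== SOURCE B (Python) =====
-- _GROUPS = (
--     (('integration', 'api', 'workflow', 'full', 'complete'), 0),
--     (('model', 'contract', 'template'), 1),
--     (('service', 'analyzer', 'processor'), 2),
--     (('util', 'helper', 'validator'), 3),
--     (('route', 'endpoint', 'api'), 4),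
-- )
-- _TARGETS = (None, 'tests/unit/models', 'tests/unit/services', 'tests/unit/utils', 'tests/unit/api')
-- _SUBGROUPS = ((('analysis',), 0), (('report',), 1))
-- _SUBTARGETS = ('tests/integration/analysis', 'tests/integration/reports', 'tests/integration/workflows')
--
--
-- def categorize_test_file(filename):
--     """Determine which subdirectory a test file should go to.
--
--     Scoring approach: collect the priority of every keyword group that
--     matches, take the best (minimum) priority and translate it to a target;
--     priority 0 (integration) gets the same minimum treatment for its
--     sub-targets."""
--     name = filename.lower()
--     hits = [p for keys, p in _GROUPS if any(k in name for k in keys)]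
--     if not hits:
--         return 'tests/integration/workflows'
--     best = min(hits)
--     if best == 0:
--         sub = min([p for keys, p in _SUBGROUPS if any(k in name for k in keys)] + [2])
--         return _SUBTARGETS[sub]
--     return _TARGETS[best]
-- ===== Notes on version B (the rewrite author's own statement) =====
-- stated objective: alternative
-- what changed: Replaces the ordered first-match branch chain by a scoring pass: collect the priority of every matching keyword group, take the minimum priority and translate it to a target (so the dead unit 'api' rule is harmlessly dominated by the integration group instead of being an unreachable branch).
import Mathlib
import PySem

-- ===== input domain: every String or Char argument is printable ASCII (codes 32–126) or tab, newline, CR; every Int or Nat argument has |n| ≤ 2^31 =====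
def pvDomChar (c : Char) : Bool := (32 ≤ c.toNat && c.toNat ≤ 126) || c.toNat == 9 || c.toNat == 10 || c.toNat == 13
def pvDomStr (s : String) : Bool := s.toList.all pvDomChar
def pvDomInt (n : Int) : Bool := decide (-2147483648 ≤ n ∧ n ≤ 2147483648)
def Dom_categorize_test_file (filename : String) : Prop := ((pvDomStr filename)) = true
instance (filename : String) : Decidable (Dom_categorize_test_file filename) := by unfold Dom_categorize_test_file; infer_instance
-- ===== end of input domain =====

-- B replaces A's ordered first-match branch chain by a min-priority scoring pass over the same keyword groups (alternative decomposition, same cost).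


-- ===== PORT A =====
def categorize_test_file (filename : String) : String :=
  let name_lower := PySem.Str.lower filename
  if ["integration", "api", "workflow", "full", "complete"].any (fun x => PySem.Str.isIn x name_lower) then
    if PySem.Str.isIn "analysis" name_lower then "tests/integration/analysis"
    else if PySem.Str.isIn "report" name_lower then "tests/integration/reports"
    else "tests/integration/workflows"
  else if ["model", "contract", "template"].any (fun x => PySem.Str.isIn x name_lower) then "tests/unit/models"
  else if ["service", "analyzer", "processor"].any (fun x => PySem.Str.isIn x name_lower) then "tests/unit/services"
  else if ["util", "helper", "validator"].any (fun x => PySem.Str.isIn x name_lower) then "tests/unit/utils"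
  else if ["route", "endpoint", "api"].any (fun x => PySem.Str.isIn x name_lower) then "tests/unit/api"
  else "tests/integration/workflows"

-- ===== PORT B =====
-- B: collect the priority of every matching keyword group, take the minimum, translate it to a target.
def pvGroups : List (List String × Int) :=
  [(["integration", "api", "workflow", "full", "complete"], 0),
   (["model", "contract", "template"], 1),
   (["service", "analyzer", "processor"], 2),
   (["util", "helper", "validator"], 3),
   (["route", "endpoint", "api"], 4)]
-- index 0 is a placeholder (Python has None there): best = 0 is handled by the sub-target branch
def pvTargets : List String :=
  ["", "tests/unit/models", "tests/unit/services", "tests/unit/utils", "tests/unit/api"]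
def pvSubGroups : List (List String × Int) := [(["analysis"], 0), (["report"], 1)]
def pvSubTargets : List String :=
  ["tests/integration/analysis", "tests/integration/reports", "tests/integration/workflows"]

def categorize_test_file_alt (filename : String) : String :=
  let name := PySem.Str.lower filename
  let hits := (pvGroups.filter (fun g => g.1.any (fun k => PySem.Str.isIn k name))).map Prod.snd
  -- Python: 'if not hits: return default' then 'min(hits)'; min? is none exactly on []
  match PySem.List.min? hits (fun p => p) with
  | none => "tests/integration/workflows"
  | some best =>
    if best = 0 then
      let sub := (PySem.List.min?
        (((pvSubGroups.filter (fun g => g.1.any (fun k => PySem.Str.isIn k name))).map Prod.snd) ++ [2])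
        (fun p => p)).getD 2
      -- _SUBTARGETS[sub]: sub ∈ {0,1,2}, always in range (the .getD "" default is never used)
      (PySem.List.pyGet? pvSubTargets sub).getD ""
    else
      -- _TARGETS[best]: best ∈ {1,2,3,4} here, always in range
      (PySem.List.pyGet? pvTargets best).getD ""

-- ===== PRECONDITION & SPEC =====
def Spec_categorize_test_file (filename : String) (out : String) : Prop := out = categorize_test_file_alt filename
instance (filename : String) (out : String) : Decidable (Spec_categorize_test_file filename out) := by unfold Spec_categorize_test_file; infer_instance

-- ===== CLAIM (what is proved, stated in full; the proofs are below) =====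
def Claim_equal_categorize_test_file : Prop := ∀ (filename : String), Dom_categorize_test_file filename → Spec_categorize_test_file filename (categorize_test_file filename)

-- ===== LEMMAS AND PROOFS =====

-- ===== VERDICT (by name: the statement is the Claim_ definition above) =====
theorem categorize_test_file_spec : Claim_equal_categorize_test_file := by
  intro filename _
  unfold Spec_categorize_test_file categorize_test_file categorize_test_file_alt
  simp only [pvGroups, pvTargets, pvSubGroups, pvSubTargets,
    List.filter_cons, List.filter_nil, List.any_cons, List.any_nil, Bool.or_false]
  set n := PySem.Str.lower filename with hn
  by_cases h0 : (PySem.Str.isIn "integration" n || (PySem.Str.isIn "api" n || (PySem.Str.isIn "workflow" n || (PySem.Str.isIn "full" n || PySem.Str.isIn "complete" n)))) = true <;>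
  by_cases h1 : (PySem.Str.isIn "model" n || (PySem.Str.isIn "contract" n || PySem.Str.isIn "template" n)) = true <;>
  by_cases h2 : (PySem.Str.isIn "service" n || (PySem.Str.isIn "analyzer" n || PySem.Str.isIn "processor" n)) = true <;>
  by_cases h3 : (PySem.Str.isIn "util" n || (PySem.Str.isIn "helper" n || PySem.Str.isIn "validator" n)) = true <;>
  by_cases h4 : (PySem.Str.isIn "route" n || (PySem.Str.isIn "endpoint" n || PySem.Str.isIn "api" n)) = true <;>
  by_cases h5 : PySem.Str.isIn "analysis" n = true <;>
  by_cases h6 : PySem.Str.isIn "report" n = true <;>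
  simp only [h0, h1, h2, h3, h4, h5, h6, Bool.not_eq_true] at * <;>
  simp only [if_pos, if_neg, Bool.false_eq_true, not_false_iff] <;> rfl
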